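-- pv_equiv track=rewrite | github.com/XunylYasna/Murang-Algocom | emperor/proof.py | solution
-- ===== SOURCE A (Python) =====
-- def getOne(string):
--     first = "pqrst"
--     second ="N"
--     third = "KACE"
--
--
--     if(len(string) < 1):
--         return ""
--
--     char = string[0]
--
--     if char in first:
--         return char
--
--     if char in second:
--         temp = getOne(string[1:])
--         if temp == "":
--             return ""
--         return string[0] + temp
--
--     if char in third:
--         temp1 = getOne(string[1:])
--         if(temp1 == ""):
--             return ""
--         temp2 = getOne(string[len(temp1)+1:])
--         if(temp2 != ""):
--             return string[0] + temp1 + temp2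
--
--     return ""
--
-- def solution(string):
--     curr = ""
--     first = "pqrst"
--     second ="N"
--     third = "KACE"
--     end = 0
--     i = 0
--
--     while i < len(string):
--         temp = ""
--         char = string[i]
--
--         if char in first:
--             temp = char
--
--         elif char in second:
--             temp = getOne(string[i:]) #get substring and end index of the N operator
--             if temp != "": #invalid N operator
--                 i = i + len(temp) - 1
--
--         elif char in third:
--             #get substring and end index of the KACE operators (two wffs)
--             temp1 = getOne(string[i:])
--             temp = temp1
--             if temp != "":
--                 i = i + len(temp) - 1
--
--         if len(temp) >= len(curr):
--             curr = temp
--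
--         i+=1
--
--     if curr == "":
--         return "no WFF possible"
--     return curr
-- ===== SOURCE B (Python) =====
-- def solution(string):
--     n = len(string)
--     first = "pqrst"
--     third = "KACE"
--     # wff[i] = length of the WFF that a prefix parse starting at i yields (0 if none)
--     wff = [0] * (n + 1)
--     for i in range(n - 1, -1, -1):
--         c = string[i]
--         if c in first:
--             wff[i] = 1
--         elif c == "N":
--             if wff[i + 1] > 0:
--                 wff[i] = 1 + wff[i + 1]
--         elif c in third:
--             l1 = wff[i + 1]
--             if l1 > 0:
--                 l2 = wff[i + 1 + l1]
--                 if l2 > 0: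
--                     wff[i] = 1 + l1 + l2
--     best_start = 0
--     best_len = 0
--     i = 0
--     while i < n:
--         L = wff[i]
--         if L >= best_len:
--             best_start, best_len = i, L
--         i += L if L > 0 else 1
--     if best_len == 0:
--         return "no WFF possible"
--     return string[best_start:best_start + best_len]
-- ===== Notes on version B (the rewrite author's own statement) =====
-- stated objective: faster
-- what changed: Replaces the per-position recursive re-parse (getOne) with a right-to-left O(n) dynamic program computing the WFF length at every index, followed by one greedy left-to-right scan tracking the best (start,len).
import Mathlib
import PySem

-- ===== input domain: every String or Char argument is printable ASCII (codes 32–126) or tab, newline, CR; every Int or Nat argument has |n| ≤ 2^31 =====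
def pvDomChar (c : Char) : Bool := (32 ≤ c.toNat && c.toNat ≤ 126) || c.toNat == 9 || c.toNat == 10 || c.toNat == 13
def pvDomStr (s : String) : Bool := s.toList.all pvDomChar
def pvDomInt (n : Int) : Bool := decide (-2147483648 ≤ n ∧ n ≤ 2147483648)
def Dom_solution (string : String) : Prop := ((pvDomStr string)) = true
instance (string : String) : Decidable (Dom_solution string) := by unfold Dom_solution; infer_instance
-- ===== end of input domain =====

-- B replaces A's per-position recursive parser with a right-to-left DP of WFF
-- lengths plus one greedy scan (objective: faster, O(n) vs O(n^2)).

-- ===== PORT A =====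
def firstChars : List Char := ['p','q','r','s','t']
def thirdChars : List Char := ['K','A','C','E']

-- port of Python getOne, over List Char
def getOneL : List Char → List Char
  | [] => []
  | c :: t =>
    if c ∈ firstChars then [c]
    else if c = 'N' then
      let temp := getOneL t
      if temp = [] then [] else c :: temp
    else if c ∈ thirdChars then
      let temp1 := getOneL t
      if temp1 = [] then []
      else
        let temp2 := getOneL ((c :: t).drop (temp1.length + 1))
        if temp2 ≠ [] then c :: (temp1 ++ temp2) else []
    else []
termination_by s => s.length
decreasing_by all_goals (simp only [List.length_cons, List.length_drop]; omega)

-- port of A's while loop: state (i, curr)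
def loopA (s : List Char) (i : Nat) (curr : List Char) : List Char :=
  if h : i < s.length then
    let char := s[i]
    if char ∈ firstChars then
      loopA s (i + 1) (if curr.length ≤ 1 then [char] else curr)
    else if char = 'N' then
      let temp := getOneL (s.drop i)
      let i' := if temp ≠ [] then i + temp.length - 1 else i
      loopA s (i' + 1) (if curr.length ≤ temp.length then temp else curr)
    else if char ∈ thirdChars then
      let temp := getOneL (s.drop i)
      let i' := if temp ≠ [] then i + temp.length - 1 else i
      loopA s (i' + 1) (if curr.length ≤ temp.length then temp else curr)
    else
      loopA s (i + 1) (if curr.length ≤ 0 then [] else curr)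
  else curr
termination_by s.length - i
decreasing_by
  · omega
  · by_cases ht : getOneL (s.drop i) = []
    · simp [ht]; omega
    · have := List.length_pos_of_ne_nil ht
      simp [ht]; omega
  · by_cases ht : getOneL (s.drop i) = []
    · simp [ht]; omega
    · have := List.length_pos_of_ne_nil ht
      simp [ht]; omega
  · omega

def solution (string : String) : String :=
  let r := loopA string.toList 0 []
  if r = [] then "no WFF possible" else String.mk r

-- ===== PORT B =====
-- dpB s = the list [wff 0, wff 1, …] of WFF lengths, built right to left
def dpB : List Char → List Nat
  | [] => []
  | c :: t =>
    let rest := dpB t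
    let v : Nat :=
      if c ∈ firstChars then 1
      else if c = 'N' then
        (if rest.getD 0 0 > 0 then 1 + rest.getD 0 0 else 0)
      else if c ∈ thirdChars then
        let l1 := rest.getD 0 0
        if l1 > 0 then
          let l2 := rest.getD l1 0
          if l2 > 0 then 1 + l1 + l2 else 0
        else 0
      else 0
    v :: rest

-- port of B's greedy scan: state (i, bestStart, bestLen)
def scanB (n : Nat) (dp : List Nat) (i bs bl : Nat) : Nat × Nat :=
  if _h : i < n then
    let L := dp.getD i 0
    let p := if L ≥ bl then (i, L) else (bs, bl)
    scanB n dp (i + (if L > 0 then L else 1)) p.1 p.2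
  else (bs, bl)
termination_by n - i
decreasing_by split <;> omega

def solution_alt (string : String) : String :=
  let cs := string.toList
  let dp := dpB cs
  let p := scanB cs.length dp 0 0 0
  if p.2 = 0 then "no WFF possible"
  else String.mk ((cs.drop p.1).take p.2)

-- ===== PRECONDITION & SPEC =====
def Spec_solution (string : String) (out : String) : Prop := out = solution_alt string
instance (string : String) (out : String) : Decidable (Spec_solution string out) := by unfold Spec_solution; infer_instance

-- ===== CLAIM (what is proved, stated in full; the proofs are below) =====
def Claim_equal_solution : Prop := ∀ (string : String), Dom_solution string → Spec_solution string (solution string)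

-- ===== LEMMAS AND PROOFS =====

theorem getOneL_prefix (s : List Char) : getOneL s <+: s := by
  induction hn : s.length using Nat.strong_induction_on generalizing s with
  | _ n ih =>
  subst hn
  match s with
  | [] => simp [getOneL]
  | c :: t =>
    have iht : getOneL t <+: t := ih t.length (by simp) t rfl
    have ihd : getOneL (t.drop (getOneL t).length) <+: t.drop (getOneL t).length :=
      ih _ (by simp only [List.length_drop, List.length_cons]; omega) _ rfl
    rw [getOneL]
    by_cases h1 : c ∈ firstChars
    · simp [h1]
    by_cases h2 : c = 'N'
    · rw [if_neg h1, if_pos h2]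
      by_cases h3 : getOneL t = []
      · simp [h3]
      · simp only [h3, if_false, h2, List.cons_prefix_cons]
        exact ⟨trivial, iht⟩
    by_cases h4 : c ∈ thirdChars
    · rw [if_neg h1, if_neg h2, if_pos h4]
      by_cases h3 : getOneL t = []
      · simp [h3]
      · simp only [h3, if_false, List.drop_succ_cons]
        by_cases h5 : getOneL (t.drop (getOneL t).length) = []
        · simp [h5]
        · simp only [h5, ne_eq, not_false_eq_true, if_true, List.cons_prefix_cons,
            true_and]
          obtain ⟨r, hr⟩ := ihd
          refine ⟨r, ?_⟩
          rw [List.append_assoc, hr]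
          exact List.prefix_iff_eq_append.mp iht
    · simp [h1, h2, h4]


theorem dpB_getD (s : List Char) : ∀ (i : Nat),
    (dpB s).getD i 0 = (getOneL (s.drop i)).length := by
  induction s with
  | nil => intro i; simp [dpB, getOneL]
  | cons c t iht =>
    intro i
    match i with
    | Nat.succ j => simpa [dpB] using iht j
    | 0 =>
      have h0 : (dpB t).getD 0 0 = (getOneL t).length := by simpa using iht 0
      simp only [dpB, List.getD_cons_zero, List.drop_zero]
      rw [getOneL]
      by_cases h1 : c ∈ firstChars
      · simp [h1]
      by_cases h2 : c = 'N'
      · rw [if_neg h1, if_pos h2, if_neg h1, if_pos h2, h0]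
        by_cases h3 : getOneL t = []
        · simp [h3]
        · have := List.length_pos_of_ne_nil h3
          simp only [h3, if_false]
          rw [if_pos this]
          simp only [List.length_cons]
          omega
      by_cases h4 : c ∈ thirdChars
      · rw [if_neg h1, if_neg h2, if_pos h4, if_neg h1, if_neg h2, if_pos h4, h0]
        by_cases h3 : getOneL t = []
        · simp [h3]
        · have hp := List.length_pos_of_ne_nil h3
          have hd : (dpB t).getD (getOneL t).length 0
              = (getOneL (t.drop (getOneL t).length)).length := iht _
          simp only [h3, if_false, List.drop_succ_cons]
          rw [if_pos hp, hd]
          by_cases h5 : getOneL (t.drop (getOneL t).length) = []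
          · simp [h5]
          · have hp2 := List.length_pos_of_ne_nil h5
            rw [if_pos hp2]
            simp only [h5, ne_eq, not_false_eq_true, if_true, List.length_cons,
              List.length_append]
            omega
      · simp [h1, h2, h4]

theorem loop_eq_aux : ∀ (k : Nat) (s : List Char) (i bs bl : Nat),
    s.length - i ≤ k →
    bl = ((s.drop bs).take bl).length →
    loopA s i ((s.drop bs).take bl) =
      (s.drop (scanB s.length (dpB s) i bs bl).1).take (scanB s.length (dpB s) i bs bl).2 ∧
    (scanB s.length (dpB s) i bs bl).2 =
      ((s.drop (scanB s.length (dpB s) i bs bl).1).take (scanB s.length (dpB s) i bs bl).2).length := by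
  intro k
  induction k with
  | zero =>
    intro s i bs bl hk hbl
    have h : ¬ i < s.length := by omega
    rw [loopA, scanB, dif_neg h, dif_neg h]
    exact ⟨rfl, hbl⟩
  | succ k ihk =>
    intro s i bs bl hk hbl
    by_cases h : i < s.length
    case neg => rw [loopA, scanB, dif_neg h, dif_neg h]; exact ⟨rfl, hbl⟩
    case pos =>
      rw [loopA, scanB]
      rw [dif_pos h, dif_pos h]
      simp only []
      have hL := dpB_getD s i
      have hdrop : s.drop i = s[i] :: s.drop (i+1) := List.drop_eq_getElem_cons h
      have hcurlen : ((s.drop bs).take bl).length = bl := hbl.symm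
      by_cases h1 : s[i] ∈ firstChars
      · rw [if_pos h1]
        have hone : getOneL (s.drop i) = [s[i]] := by rw [hdrop, getOneL, if_pos h1]
        rw [hone] at hL
        simp only [List.length_cons, List.length_nil] at hL
        rw [hL]
        simp only [hcurlen]
        by_cases hc : bl ≤ 1
        · rw [if_pos hc, if_pos (by omega : (1:Nat) ≥ bl)]
          have h1take : [s[i]] = (s.drop i).take 1 := by rw [hdrop, List.take_succ_cons, List.take_zero]
          rw [h1take]
          have := ihk s (i+1) i 1 (by omega) (by rw [← h1take]; simp)
          simpa using this
        · rw [if_neg hc, if_neg (by omega : ¬ (1:Nat) ≥ bl)]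
          have := ihk s (i+1) bs bl (by omega) hbl
          simpa using this
      by_cases h2 : s[i] = 'N'
      · rw [if_neg h1, if_pos h2]
        rw [hL, hcurlen]
        have htake : (s.drop i).take (getOneL (s.drop i)).length = getOneL (s.drop i) :=
          (List.prefix_iff_eq_take.mp (getOneL_prefix _)).symm
        by_cases h3 : getOneL (s.drop i) = []
        · rw [h3]
          simp only [List.length_nil, ne_eq, not_true_eq_false, if_false, Nat.le_zero,
            lt_irrefl, ge_iff_le]
          by_cases hc : bl = 0
          · subst hc
            rw [if_pos rfl]
            have := ihk s (i+1) i 0 (by omega) (by simp)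
            simpa using this
          · have := ihk s (i+1) bs bl (by omega) hbl
            simpa [hc] using this
        · have hp : 0 < (getOneL (s.drop i)).length := List.length_pos_of_ne_nil h3
          simp only [h3, ne_eq, not_false_eq_true, if_true, ge_iff_le]
          rw [if_pos hp]
          have harith : i + (getOneL (s.drop i)).length - 1 + 1
              = i + (getOneL (s.drop i)).length := by omega
          rw [harith]
          by_cases hc : bl ≤ (getOneL (s.drop i)).length
          · rw [if_pos hc, if_pos hc]
            have hbl2 : (getOneL (s.drop i)).length
                = ((s.drop i).take (getOneL (s.drop i)).length).length := by rw [htake]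
            have := ihk s (i + (getOneL (s.drop i)).length) i (getOneL (s.drop i)).length
              (by omega) hbl2
            rw [htake] at this
            simpa using this
          · rw [if_neg hc, if_neg hc]
            have := ihk s (i + (getOneL (s.drop i)).length) bs bl (by omega) hbl
            simpa using this
      by_cases h4 : s[i] ∈ thirdChars
      · rw [if_neg h1, if_neg h2, if_pos h4]
        rw [hL, hcurlen]
        have htake : (s.drop i).take (getOneL (s.drop i)).length = getOneL (s.drop i) :=
          (List.prefix_iff_eq_take.mp (getOneL_prefix _)).symm
        by_cases h3 : getOneL (s.drop i) = []
        · rw [h3]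
          simp only [List.length_nil, ne_eq, not_true_eq_false, if_false, Nat.le_zero,
            lt_irrefl, ge_iff_le]
          by_cases hc : bl = 0
          · subst hc
            rw [if_pos rfl]
            have := ihk s (i+1) i 0 (by omega) (by simp)
            simpa using this
          · have := ihk s (i+1) bs bl (by omega) hbl
            simpa [hc] using this
        · have hp : 0 < (getOneL (s.drop i)).length := List.length_pos_of_ne_nil h3
          simp only [h3, ne_eq, not_false_eq_true, if_true, ge_iff_le]
          rw [if_pos hp]
          have harith : i + (getOneL (s.drop i)).length - 1 + 1
              = i + (getOneL (s.drop i)).length := by omega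
          rw [harith]
          by_cases hc : bl ≤ (getOneL (s.drop i)).length
          · rw [if_pos hc, if_pos hc]
            have hbl2 : (getOneL (s.drop i)).length
                = ((s.drop i).take (getOneL (s.drop i)).length).length := by rw [htake]
            have := ihk s (i + (getOneL (s.drop i)).length) i (getOneL (s.drop i)).length
              (by omega) hbl2
            rw [htake] at this
            simpa using this
          · rw [if_neg hc, if_neg hc]
            have := ihk s (i + (getOneL (s.drop i)).length) bs bl (by omega) hbl
            simpa using this
      · rw [if_neg h1, if_neg h2, if_neg h4]
        have hone : getOneL (s.drop i) = [] := by
          rw [hdrop, getOneL, if_neg h1, if_neg h2, if_neg h4]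
        rw [hone] at hL
        simp only [List.length_nil] at hL
        rw [hL, hcurlen]
        simp only [lt_irrefl, if_false, ge_iff_le, Nat.le_zero]
        by_cases hc : bl = 0
        · subst hc
          rw [if_pos rfl]
          have := ihk s (i+1) i 0 (by omega) (by simp)
          simpa using this
        · have := ihk s (i+1) bs bl (by omega) hbl
          simpa [hc] using this

theorem loop_eq (s : List Char) (i bs bl : Nat) (hbl : bl = ((s.drop bs).take bl).length) :
    loopA s i ((s.drop bs).take bl) =
      (s.drop (scanB s.length (dpB s) i bs bl).1).take (scanB s.length (dpB s) i bs bl).2 ∧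
    (scanB s.length (dpB s) i bs bl).2 =
      ((s.drop (scanB s.length (dpB s) i bs bl).1).take (scanB s.length (dpB s) i bs bl).2).length :=
  loop_eq_aux (s.length - i) s i bs bl (Nat.le_refl _) hbl

-- ===== VERDICT (by name: the statement is the Claim_ definition above) =====
theorem solution_spec : Claim_equal_solution := by
  intro string _
  unfold Spec_solution solution solution_alt
  have h := loop_eq string.toList 0 0 0 (by simp)
  rcases h' : scanB string.toList.length (dpB string.toList) 0 0 0 with ⟨bs, bl⟩
  rw [h'] at h
  simp only [List.drop_zero, List.take_zero] at h
  obtain ⟨h1, h2⟩ := h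
  simp only [h1, h']
  by_cases hz : bl = 0
  · subst hz; simp
  · have hne : (List.take bl (List.drop bs string.toList)) ≠ [] := by
      intro hc; rw [hc] at h2; simp at h2; exact hz h2
    rw [if_neg hne, if_neg hz]
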